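-- pv_equiv track=rewrite | github.com/CostaLautaroGithub/sintaxis | lexer.py | automata_simbolos
-- ===== SOURCE A (Python) =====
-- ESTADO_TRAMPA = "TRAMPA"
--
-- ESTADO_FINAL = "ACEPTADO"
--
-- ESTADO_NO_FINAL = "NO ACEPTADO"
--
-- def automata_simbolos(cadena):
--     simbolos = ["*","+","=",";"]
--
--     estado_actual = 0
--     estados_finales = [1]
--
--     for caracter in cadena:
--         if estado_actual == 0 and caracter in simbolos:
--             estado_actual = 1
--         else:
--                 estado_actual = -1
--                 break
--
--     if estado_actual == -1:
--                    return ESTADO_TRAMPA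
--     if estado_actual in estados_finales:
--                    return ESTADO_FINAL
--     else:
--                    return ESTADO_NO_FINAL
-- ===== SOURCE B (Python) =====
-- ESTADO_TRAMPA = "TRAMPA"
--
-- ESTADO_FINAL = "ACEPTADO"
--
-- ESTADO_NO_FINAL = "NO ACEPTADO"
--
-- def automata_simbolos(cadena):
--     simbolos = ["*", "+", "=", ";"]
--     if len(cadena) == 0:
--         return ESTADO_NO_FINAL
--     if len(cadena) == 1 and cadena[0] in simbolos:
--         return ESTADO_FINAL
--     return ESTADO_TRAMPA
-- ===== Notes on version B (the rewrite author's own statement) =====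
-- stated objective: simpler
-- what changed: Replaced the automaton simulation (running state, transition loop, break, final-state lookup) with a direct branch-only case analysis on the string's length and its first character's membership in the symbol list.
import Mathlib
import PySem

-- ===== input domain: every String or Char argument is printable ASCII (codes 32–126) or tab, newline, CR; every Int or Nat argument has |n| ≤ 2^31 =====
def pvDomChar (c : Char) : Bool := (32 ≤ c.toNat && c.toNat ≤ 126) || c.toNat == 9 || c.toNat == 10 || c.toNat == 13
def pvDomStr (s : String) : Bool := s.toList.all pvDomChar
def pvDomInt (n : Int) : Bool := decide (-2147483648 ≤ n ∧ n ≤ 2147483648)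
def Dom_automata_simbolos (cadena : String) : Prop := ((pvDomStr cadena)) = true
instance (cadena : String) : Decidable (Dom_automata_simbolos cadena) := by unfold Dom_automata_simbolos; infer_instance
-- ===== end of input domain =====

-- B replaces A's automaton simulation (running state, break) by a branch-only
-- case analysis on length and first-character membership; objective: simpler.

-- ===== PORT A =====
-- the for-loop with its early break: state updates until break or end of string
def automataLoopA (st : Int) : List Char → Int
  | [] => st
  | c :: cs =>
      if st == 0 && (c = '*' ∨ c = '+' ∨ c = '=' ∨ c = ';' : Bool) then
        automataLoopA 1 cs
      else
        -1  -- estado_actual = -1; break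

def automata_simbolos (cadena : String) : String :=
  let estado_actual := automataLoopA 0 cadena.toList
  if estado_actual == -1 then "TRAMPA"
  else if estado_actual ∈ [(1 : Int)] then "ACEPTADO"
  else "NO ACEPTADO"

-- ===== PORT B =====
def automata_simbolos_alt (cadena : String) : String :=
  match cadena.toList with
  | [] => "NO ACEPTADO"
  | [c] => if (c = '*' ∨ c = '+' ∨ c = '=' ∨ c = ';' : Bool) then "ACEPTADO" else "TRAMPA"
  | _ => "TRAMPA"

-- ===== PRECONDITION & SPEC =====
def Spec_automata_simbolos (cadena : String) (out : String) : Prop := out = automata_simbolos_alt cadena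
instance (cadena : String) (out : String) : Decidable (Spec_automata_simbolos cadena out) := by unfold Spec_automata_simbolos; infer_instance

-- ===== CLAIM (what is proved, stated in full; the proofs are below) =====
def Claim_equal_automata_simbolos : Prop := ∀ (cadena : String), Dom_automata_simbolos cadena → Spec_automata_simbolos cadena (automata_simbolos cadena)

-- ===== LEMMAS AND PROOFS =====
theorem automataLoopA_one (l : List Char) (h : l ≠ []) : automataLoopA 1 l = -1 := by
  cases l with
  | nil => exact absurd rfl h
  | cons c cs => simp [automataLoopA]

-- ===== VERDICT (by name: the statement is the Claim_ definition above) =====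
theorem automata_simbolos_spec : Claim_equal_automata_simbolos := by
  intro cadena _
  unfold Spec_automata_simbolos automata_simbolos automata_simbolos_alt
  cases h : cadena.toList with
  | nil => simp [automataLoopA]
  | cons c cs =>
    cases cs with
    | nil =>
      by_cases hc : (c = '*' ∨ c = '+' ∨ c = '=' ∨ c = ';' : Bool) = true <;>
        simp [automataLoopA, hc]
    | cons c2 cs2 =>
      by_cases hc : (c = '*' ∨ c = '+' ∨ c = '=' ∨ c = ';' : Bool) = true
      · simp [automataLoopA, hc, automataLoopA_one (c2 :: cs2) (by simp)]
      · simp [automataLoopA, hc]
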